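-- pv_equiv track=rewrite | github.com/portante/glusterfs | ufo/gluster/swift/common/DiskDir.py | filter_prefix
-- ===== SOURCE A (Python) =====
-- def filter_prefix(objects, prefix):
--     """
--     Accept a sorted list of strings, returning all strings starting with the
--     given prefix.
--     """
--     found = False
--     for object_name in objects:
--         if object_name.startswith(prefix):
--             yield object_name
--             found = True
--         else:
--             # Since the list is assumed to be sorted, once we find an object
--             # name that does not start with the prefix we know we won't find
--             # any others, so we exit early.
--             if found:
--                 break
-- ===== SOURCE B (Python) =====
-- def filter_prefix(objects, prefix):
--     """
--     Accept a sorted list of strings, returning all strings starting with the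
--     given prefix.
--
--     Two-pointer rewrite: locate the start of the first matching block, then
--     its end, and yield that slice -- no per-element flag bookkeeping.
--     """
--     n = len(objects)
--     i = 0
--     while i < n and not objects[i].startswith(prefix):
--         i += 1
--     j = i
--     while j < n and objects[j].startswith(prefix):
--         j += 1
--     yield from objects[i:j]
-- ===== Notes on version B (the rewrite author's own statement) =====
-- stated objective: alternative
-- what changed: Replaces A's yield-loop with a found flag and early break by a two-pointer scan that computes the start and end indices of the first matching block and yields that slice.
import Mathlib
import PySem

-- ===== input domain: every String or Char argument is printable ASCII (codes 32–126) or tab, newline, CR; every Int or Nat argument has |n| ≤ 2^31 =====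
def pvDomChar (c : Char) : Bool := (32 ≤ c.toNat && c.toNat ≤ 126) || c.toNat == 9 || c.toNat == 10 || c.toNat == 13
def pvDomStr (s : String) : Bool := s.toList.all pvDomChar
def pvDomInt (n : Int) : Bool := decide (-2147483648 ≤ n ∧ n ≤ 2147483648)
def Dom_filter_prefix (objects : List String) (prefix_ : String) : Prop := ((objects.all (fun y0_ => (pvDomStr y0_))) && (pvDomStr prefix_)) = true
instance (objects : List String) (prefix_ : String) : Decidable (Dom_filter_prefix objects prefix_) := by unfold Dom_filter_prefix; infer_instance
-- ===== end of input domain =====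

-- B replaces A's flagged yield-loop by a two-pointer block scan; alternative structure, same O(n) cost.


-- ===== PORT A =====
-- A's generator loop: carry the `found` flag, yield matches, break at the
-- first non-match once something was found.
def fpGoA (prefix_ : String) (found : Bool) : List String → List String
  | [] => []
  | o :: rest =>
    if PySem.Str.startswith o prefix_ then o :: fpGoA prefix_ true rest
    else if found then [] else fpGoA prefix_ found rest

def filter_prefix (objects : List String) (prefix_ : String) : List String :=
  fpGoA prefix_ false objects

-- ===== PORT B =====
-- first while loop of Source B: advance i past leading non-matches
def fpFind (objects : List String) (prefix_ : String) (i : Nat) : Nat :=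
  if h : i < objects.length then
    if PySem.Str.startswith objects[i] prefix_ then i
    else fpFind objects prefix_ (i + 1)
  else i
termination_by objects.length - i

-- second while loop of Source B: advance j while matches continue
def fpEnd (objects : List String) (prefix_ : String) (j : Nat) : Nat :=
  if h : j < objects.length then
    if PySem.Str.startswith objects[j] prefix_ then fpEnd objects prefix_ (j + 1)
    else j
  else j
termination_by objects.length - j

def filter_prefix_alt (objects : List String) (prefix_ : String) : List String :=
  let i := fpFind objects prefix_ 0
  let j := fpEnd objects prefix_ i
  PySem.List.slice objects (some (i : Int)) (some (j : Int))

-- ===== PRECONDITION & SPEC =====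
def Spec_filter_prefix (objects : List String) (prefix_ : String) (out : List String) : Prop := out = filter_prefix_alt objects prefix_
instance (objects : List String) (prefix_ : String) (out : List String) : Decidable (Spec_filter_prefix objects prefix_ out) := by unfold Spec_filter_prefix; infer_instance

-- ===== CLAIM (what is proved, stated in full; the proofs are below) =====
def Claim_equal_filter_prefix : Prop := ∀ (objects : List String) (prefix_ : String), Dom_filter_prefix objects prefix_ → Spec_filter_prefix objects prefix_ (filter_prefix objects prefix_)

-- ===== LEMMAS AND PROOFS =====

lemma fpGoA_true (prefix_ : String) (l : List String) :
    fpGoA prefix_ true l = l.takeWhile (fun o => PySem.Str.startswith o prefix_) := by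
  induction l with
  | nil => rfl
  | cons o rest ih =>
    simp only [fpGoA, List.takeWhile_cons, PySem.Str.startswith_eq] at *
    by_cases h : PySem.Chars.startswith o.toList prefix_.toList <;> simp [h, ih]

lemma fpGoA_false (prefix_ : String) (l : List String) :
    fpGoA prefix_ false l =
      (l.dropWhile (fun o => !PySem.Str.startswith o prefix_)).takeWhile
        (fun o => PySem.Str.startswith o prefix_) := by
  induction l with
  | nil => rfl
  | cons o rest ih =>
    simp only [fpGoA, List.dropWhile_cons, PySem.Str.startswith_eq] at *
    by_cases h : PySem.Chars.startswith o.toList prefix_.toList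
    · simp [h, fpGoA_true]
    · simp [h, ih]

lemma fpFind_drop (objects : List String) (prefix_ : String) (i : Nat) :
    objects.drop (fpFind objects prefix_ i) =
      (objects.drop i).dropWhile (fun o => !PySem.Str.startswith o prefix_) := by
  fun_induction fpFind with
  | case1 i h hsw =>
    simp only [PySem.Str.startswith_eq] at hsw
    rw [List.drop_eq_getElem_cons h, List.dropWhile_cons]
    simp [hsw]
  | case2 i h hsw ih =>
    simp only [PySem.Str.startswith_eq] at hsw
    rw [List.drop_eq_getElem_cons h, List.dropWhile_cons]
    simp [hsw, ih]
  | case3 i h =>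
    rw [List.drop_of_length_le (by omega)]
    simp

lemma fpEnd_ge (objects : List String) (prefix_ : String) (j : Nat) :
    j ≤ fpEnd objects prefix_ j := by
  fun_induction fpEnd <;> omega

lemma fpEnd_take (objects : List String) (prefix_ : String) (j : Nat) :
    (objects.drop j).takeWhile (fun o => PySem.Str.startswith o prefix_) =
      (objects.drop j).take (fpEnd objects prefix_ j - j) := by
  fun_induction fpEnd with
  | case1 j h hsw ih =>
    have hge := fpEnd_ge objects prefix_ (j + 1)
    have hj : fpEnd objects prefix_ (j + 1) - j = (fpEnd objects prefix_ (j + 1) - (j + 1)) + 1 := by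
      omega
    simp only [PySem.Str.startswith_eq] at hsw ih
    rw [List.drop_eq_getElem_cons h, List.takeWhile_cons, hj, List.take_succ_cons]
    simp [hsw, ih]
  | case2 j h hsw =>
    simp only [PySem.Str.startswith_eq] at hsw
    rw [List.drop_eq_getElem_cons h, List.takeWhile_cons]
    simp [hsw]
  | case3 j h =>
    rw [List.drop_of_length_le (by omega)]
    simp

-- ===== VERDICT (by name: the statement is the Claim_ definition above) =====
theorem filter_prefix_spec : Claim_equal_filter_prefix := by
  intro objects prefix_ _
  show filter_prefix objects prefix_ = filter_prefix_alt objects prefix_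
  unfold filter_prefix filter_prefix_alt
  rw [PySem.List.slice_natCast, ← fpEnd_take, fpFind_drop, List.drop_zero, fpGoA_false]
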